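-- pv_equiv track=rewrite | github.com/Sammyalade/pythonProject | My Project/task/task_one.py | multiply_elements_at_third_positions
-- ===== SOURCE A (Python) =====
-- def multiply_elements_at_third_positions(lists) -> int:
--     count = 0
--     total = 1
--     for item in lists:
--         count += 1
--         if count % 3 == 0:
--             total *= item
--
--     return total
-- ===== SOURCE B (Python) =====
-- from itertools import islice
-- from math import prod
--
-- def multiply_elements_at_third_positions(lists) -> int:
--     return prod(islice(lists, 2, None, 3))
-- ===== Notes on version B (the rewrite author's own statement) =====
-- stated objective: idiomatic
-- what changed: Replaces the manual counter-and-branch loop by selecting every third element with itertools.islice and folding with math.prod; no counter or conditional is maintained.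
import Mathlib
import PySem

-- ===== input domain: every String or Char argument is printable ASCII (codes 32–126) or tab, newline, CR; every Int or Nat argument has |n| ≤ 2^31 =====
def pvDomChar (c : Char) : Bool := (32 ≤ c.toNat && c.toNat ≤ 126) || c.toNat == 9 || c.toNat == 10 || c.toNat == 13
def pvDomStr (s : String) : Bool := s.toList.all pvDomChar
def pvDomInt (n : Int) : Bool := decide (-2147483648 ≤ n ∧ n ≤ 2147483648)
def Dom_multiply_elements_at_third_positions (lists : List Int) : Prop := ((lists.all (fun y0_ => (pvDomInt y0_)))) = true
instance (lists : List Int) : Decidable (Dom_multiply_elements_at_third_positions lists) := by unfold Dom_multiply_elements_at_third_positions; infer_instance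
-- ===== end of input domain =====

-- B replaces A's counter-and-branch loop by selecting every third element (islice(lists,2,None,3)) and folding a product over the selection; objective: more idiomatic, same cost.


-- ===== PORT A =====
-- literal transliteration of A: fold carrying (count, total), multiplying when count % 3 == 0
def multiply_elements_at_third_positions (lists : List Int) : Int :=
  (lists.foldl (fun (s : Int × Int) item =>
      let count := s.1 + 1
      let total := if count % 3 == 0 then s.2 * item else s.2
      (count, total)) (0, 1)).2

-- ===== PORT B =====
-- B: islice(lists, 2, None, 3) = every third element starting at index 2, then math.prod (left fold from 1).
def pvIslice2None3 : List Int → List Int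
  | _ :: _ :: c :: rest => c :: pvIslice2None3 rest
  | _ => []

def multiply_elements_at_third_positions_alt (lists : List Int) : Int :=
  (pvIslice2None3 lists).foldl (· * ·) 1

-- ===== PRECONDITION & SPEC =====
def Spec_multiply_elements_at_third_positions (lists : List Int) (out : Int) : Prop := out = multiply_elements_at_third_positions_alt lists
instance (lists : List Int) (out : Int) : Decidable (Spec_multiply_elements_at_third_positions lists out) := by unfold Spec_multiply_elements_at_third_positions; infer_instance

-- ===== CLAIM (what is proved, stated in full; the proofs are below) =====
def Claim_equal_multiply_elements_at_third_positions : Prop := ∀ (lists : List Int), Dom_multiply_elements_at_third_positions lists → Spec_multiply_elements_at_third_positions lists (multiply_elements_at_third_positions lists)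

-- ===== LEMMAS AND PROOFS =====
theorem pv_fold_eq (l : List Int) : ∀ (c t : Int), c % 3 = 0 →
    (l.foldl (fun (s : Int × Int) item =>
      let count := s.1 + 1
      let total := if count % 3 == 0 then s.2 * item else s.2
      (count, total)) (c, t)).2 = (pvIslice2None3 l).foldl (· * ·) t := by
  induction l using pvIslice2None3.induct with
  | case1 a b x rest ih =>
    intro c t hc
    have h1 : ((c + 1) % 3 == 0) = false := by simp; omega
    have h2 : ((c + 1 + 1) % 3 == 0) = false := by simp; omega
    have h3 : ((c + 1 + 1 + 1) % 3 == 0) = true := by simp; omega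
    simp only [List.foldl, pvIslice2None3, h1, h2, h3, if_true, if_false, Bool.false_eq_true]
    exact ih _ _ (by omega)
  | case2 l h =>
    intro c t hc
    match l with
    | [] => simp [pvIslice2None3]
    | [a] =>
      have h1 : ((c + 1) % 3 == 0) = false := by simp; omega
      simp [pvIslice2None3, List.foldl, h1]
    | [a, b] =>
      have h1 : ((c + 1) % 3 == 0) = false := by simp; omega
      have h2 : ((c + 1 + 1) % 3 == 0) = false := by simp; omega
      simp [pvIslice2None3, List.foldl, h1, h2]
    | a :: b :: x :: rest => exact absurd rfl (h a b x rest)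

-- ===== VERDICT (by name: the statement is the Claim_ definition above) =====
theorem multiply_elements_at_third_positions_spec : Claim_equal_multiply_elements_at_third_positions := by
  intro lists _
  unfold Spec_multiply_elements_at_third_positions multiply_elements_at_third_positions multiply_elements_at_third_positions_alt
  exact pv_fold_eq lists 0 1 rfl
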